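-- pv_equiv track=rewrite | github.com/A-0-K/2023-2024 | silver_spring/comp jan/bacteria.py | make_healthy
-- ===== SOURCE A (Python) =====
-- def make_healthy(npatch, bacteria_levels):
--     napplications = 0
--     for i in range(npatch - 1):
--         napplications += abs(bacteria_levels[i])
--         for j in range(i + 1, npatch):
--             bacteria_levels[j] -= (j - i + 1) * bacteria_levels[i]
--     napplications += abs(bacteria_levels[-1])
--     return napplications
-- ===== SOURCE B (Python) =====
-- def make_healthy(npatch, bacteria_levels):
--     # O(n): the finalized level of patch j satisfies
--     # c_j = b[j] - ((j+1)*S0 - S1) with running sums S0 = sum(c_i), S1 = sum(i*c_i).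
--     s0 = 0
--     s1 = 0
--     total = 0
--     healthy = list(bacteria_levels)
--     for j in range(npatch):
--         c = bacteria_levels[j] - ((j + 1) * s0 - s1)
--         healthy[j] = c
--         s0 += c
--         s1 += j * c
--         if j < npatch - 1:
--             total += abs(c)
--     return total + abs(healthy[-1])
-- ===== Notes on version B (the rewrite author's own statement) =====
-- stated objective: faster
-- what changed: Replaces A's quadratic in-place nested elimination with a single O(n) pass that computes each finalized level from two running sums S0=sum(c_i), S1=sum(i*c_i) via c_j = b[j] - ((j+1)*S0 - S1); Pre_ excludes only the inputs where A raises IndexError (empty list, npatch > len).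
import Mathlib
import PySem

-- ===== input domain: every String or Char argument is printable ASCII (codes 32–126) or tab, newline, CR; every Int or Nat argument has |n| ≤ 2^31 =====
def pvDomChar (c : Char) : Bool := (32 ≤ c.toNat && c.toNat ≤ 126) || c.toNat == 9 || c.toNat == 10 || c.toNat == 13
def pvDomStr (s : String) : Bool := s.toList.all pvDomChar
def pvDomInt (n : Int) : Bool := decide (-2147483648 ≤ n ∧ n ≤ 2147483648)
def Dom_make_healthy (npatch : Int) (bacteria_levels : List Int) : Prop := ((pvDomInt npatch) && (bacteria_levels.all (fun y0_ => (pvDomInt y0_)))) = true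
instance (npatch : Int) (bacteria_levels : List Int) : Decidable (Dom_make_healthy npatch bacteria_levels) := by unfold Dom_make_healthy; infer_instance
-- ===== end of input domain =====

-- B replaces A's quadratic in-place nested elimination by one O(n) pass with two running
-- sums; equivalence is about the RETURN value only (A mutates bacteria_levels in place, B does not).

-- ===== PORT A =====
def make_healthy (npatch : Int) (bacteria_levels : List Int) : Int :=
  let st := (PySem.List.pyRange 0 (npatch - 1) 1).foldl
    (fun (st : Int × List Int) i =>
      let napp := st.1 + |PySem.List.pyGetD st.2 i 0|
      let b := (PySem.List.pyRange (i + 1) npatch 1).foldl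
        (fun b j =>
          PySem.List.pySetD b j
            (PySem.List.pyGetD b j 0 - (j - i + 1) * PySem.List.pyGetD b i 0)) st.2
      (napp, b))
    (0, bacteria_levels)
  st.1 + |PySem.List.pyGetD st.2 (-1) 0|

-- ===== PORT B =====
def make_healthy_alt (npatch : Int) (bacteria_levels : List Int) : Int :=
  let st := (PySem.List.pyRange 0 npatch 1).foldl
    (fun (st : Int × Int × Int × List Int) j =>
      let c := PySem.List.pyGetD bacteria_levels j 0 - ((j + 1) * st.1 - st.2.1)
      let healthy := PySem.List.pySetD st.2.2.2 j c
      let total := if j < npatch - 1 then st.2.2.1 + |c| else st.2.2.1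
      (st.1 + c, st.2.1 + j * c, total, healthy))
    (0, 0, 0, bacteria_levels)
  st.2.2.1 + |PySem.List.pyGetD st.2.2.2 (-1) 0|

-- ===== PRECONDITION & SPEC =====
-- Pre_ excludes exactly the inputs on which A raises IndexError: the empty list
-- (bacteria_levels[-1]) and npatch > len (the loops index past the end).
def Pre_make_healthy (npatch : Int) (bacteria_levels : List Int) : Prop :=
  bacteria_levels ≠ [] ∧ npatch ≤ (bacteria_levels.length : Int)
instance (npatch : Int) (bacteria_levels : List Int) : Decidable (Pre_make_healthy npatch bacteria_levels) := by unfold Pre_make_healthy; infer_instance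
def pvWitness_make_healthy : Int × List Int := (2, [3, -1])

def Spec_make_healthy (npatch : Int) (bacteria_levels : List Int) (out : Int) : Prop := out = make_healthy_alt npatch bacteria_levels
instance (npatch : Int) (bacteria_levels : List Int) (out : Int) : Decidable (Spec_make_healthy npatch bacteria_levels out) := by unfold Spec_make_healthy; infer_instance

-- ===== CLAIM (what is proved, stated in full; the proofs are below) =====
def Claim_equal_make_healthy : Prop := ∀ (npatch : Int) (bacteria_levels : List Int), Dom_make_healthy npatch bacteria_levels → Pre_make_healthy npatch bacteria_levels → Spec_make_healthy npatch bacteria_levels (make_healthy npatch bacteria_levels)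

-- ===== LEMMAS AND PROOFS =====

-- (s0, s1) after j steps of B's recurrence, and the finalized level c_j.
def pvSB (L : List Int) : Nat → Int × Int
  | 0 => (0, 0)
  | j+1 =>
    let p := pvSB L j
    let c := L.getD j 0 - (((j:Int) + 1) * p.1 - p.2)
    (p.1 + c, p.2 + (j:Int) * c)

def pvC (L : List Int) (j : Nat) : Int :=
  L.getD j 0 - (((j:Int) + 1) * (pvSB L j).1 - (pvSB L j).2)

-- B's healthy list after m steps.
def pvFin (L : List Int) : Nat → List Int
  | 0 => L
  | m+1 => PySem.List.pySetD (pvFin L m) (m:Int) (pvC L m)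

theorem pvSB_eq (L : List Int) (j : Nat) :
    pvSB L j = (∑ i ∈ Finset.range j, pvC L i, ∑ i ∈ Finset.range j, (i:Int) * pvC L i) := by
  induction j with
  | zero => simp [pvSB]
  | succ j ih => simp [pvSB, ih, Finset.sum_range_succ, pvC]; ring

theorem pvC_eq (L : List Int) (j : Nat) :
    pvC L j = L.getD j 0 - ∑ i ∈ Finset.range j, ((j:Int) - (i:Int) + 1) * pvC L i := by
  rw [pvC, pvSB_eq]
  have : ∑ i ∈ Finset.range j, ((j:Int) - (i:Int) + 1) * pvC L i
      = ((j:Int) + 1) * (∑ i ∈ Finset.range j, pvC L i) - ∑ i ∈ Finset.range j, (i:Int) * pvC L i := by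
    rw [Finset.mul_sum, ← Finset.sum_sub_distrib]
    exact Finset.sum_congr rfl (fun i _ => by ring)
  rw [this]

theorem pyGetD_nn (xs : List Int) (i : Int) (h : 0 ≤ i) : PySem.List.pyGetD xs i 0 = xs.getD i.toNat 0 := by
  simp [PySem.List.pyGetD, PySem.List.pyGet?_of_nonneg xs h, List.getD_eq_getElem?_getD]

theorem pvFin_length (L : List Int) (m : Nat) : (pvFin L m).length = L.length := by
  induction m with
  | zero => rfl
  | succ m ih =>
    rw [pvFin, PySem.List.pySetD_of_nonneg _ _ (by positivity), List.length_set, ih]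

theorem pvFin_getD (L : List Int) (m : Nat) (k : Nat) :
    (pvFin L m).getD k 0 = if k < m ∧ k < L.length then pvC L k else L.getD k 0 := by
  induction m with
  | zero => rw [pvFin, if_neg (by omega)]
  | succ m ih =>
    have hlen := pvFin_length L m
    rw [pvFin, PySem.List.pySetD_of_nonneg _ _ (by positivity)]
    simp only [Int.toNat_natCast]
    rw [List.getD_eq_getElem?_getD, List.getElem?_set]
    by_cases h1 : m = k
    · subst h1
      rw [if_pos rfl]
      by_cases h2 : m < L.length
      · rw [if_pos (by omega), Option.getD_some, if_pos ⟨by omega, h2⟩]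
      · rw [if_neg (by omega), if_neg (by rintro ⟨a, b⟩; omega),
            List.getD_eq_getElem?_getD, List.getElem?_eq_none (by omega)]
    · rw [if_neg h1, ← List.getD_eq_getElem?_getD, ih]
      by_cases h3 : k < m ∧ k < L.length
      · rw [if_pos h3, if_pos ⟨by omega, h3.2⟩]
      · rw [if_neg h3, if_neg (by rintro ⟨a, b⟩; exact h3 ⟨by omega, b⟩)]

-- B's loop after m iterations.
theorem B_loop (n : Int) (L : List Int) (m : Nat) :
    (PySem.List.pyRange 0 (m:Int) 1).foldl
      (fun (st : Int × Int × Int × List Int) j =>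
        let c := PySem.List.pyGetD L j 0 - ((j + 1) * st.1 - st.2.1)
        let healthy := PySem.List.pySetD st.2.2.2 j c
        let total := if j < n - 1 then st.2.2.1 + |c| else st.2.2.1
        (st.1 + c, st.2.1 + j * c, total, healthy))
      (0, 0, 0, L)
    = ((pvSB L m).1, (pvSB L m).2,
       ∑ i ∈ Finset.range m, (if (i:Int) < n - 1 then |pvC L i| else 0),
       pvFin L m) := by
  induction m with
  | zero => simp [pvSB, pvFin]
  | succ m ih =>
    have hc : ((m:Int) + 1) = ((m+1 : Nat) : Int) := by push_cast; ring
    rw [← hc, PySem.List.pyRange_one_succ_right (by positivity), List.foldl_append, ih]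
    simp only [List.foldl_cons, List.foldl_nil]
    have hg : PySem.List.pyGetD L (m:Int) 0 = L.getD m 0 := by
      rw [pyGetD_nn _ _ (by positivity)]; simp
    simp only [hg]
    simp [pvSB, pvC, pvFin, Finset.sum_range_succ]
    split_ifs <;> simp_all

-- A's inner loop: element-wise characterization.
theorem A_inner_aux (i : Int) (n : Int) (hia : 0 ≤ i) :
    ∀ (d : Nat) (a : Int) (b : List Int), i < a → (n - a).toNat = d →
      (((PySem.List.pyRange a n 1).foldl
        (fun b j =>
          PySem.List.pySetD b j
            (PySem.List.pyGetD b j 0 - (j - i + 1) * PySem.List.pyGetD b i 0)) b).length = b.length ∧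
      ∀ k : Nat,
        ((PySem.List.pyRange a n 1).foldl
          (fun b j =>
            PySem.List.pySetD b j
              (PySem.List.pyGetD b j 0 - (j - i + 1) * PySem.List.pyGetD b i 0)) b).getD k 0
        = if a ≤ (k:Int) ∧ (k:Int) < n ∧ k < b.length
          then b.getD k 0 - ((k:Int) - i + 1) * b.getD i.toNat 0
          else b.getD k 0) := by
  intro d
  induction d with
  | zero =>
    intro a b hlt hd
    have hna : n ≤ a := by omega
    rw [PySem.List.pyRange_one_eq_nil hna]
    refine ⟨rfl, fun k => ?_⟩
    rw [if_neg]; · rfl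
    rintro ⟨h1, h2, _⟩; omega
  | succ d ihd =>
    intro a b hlt hd
    have han : a < n := by omega
    have ha0 : 0 ≤ a := le_trans hia (le_of_lt hlt)
    rw [PySem.List.pyRange_one_cons han]
    simp only [List.foldl_cons]
    set v := PySem.List.pyGetD b a 0 - (a - i + 1) * PySem.List.pyGetD b i 0 with hv
    set b1 := PySem.List.pySetD b a v with hb1
    have hlen1 : b1.length = b.length := by
      rw [hb1, PySem.List.pySetD_of_nonneg b v ha0]; exact List.length_set
    obtain ⟨hL, hK⟩ := ihd (a + 1) b1 (by omega) (by omega)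
    refine ⟨by rw [hL, hlen1], fun k => ?_⟩
    rw [hK k]
    have hb1get : ∀ k' : Nat, b1.getD k' 0 = if (k':Int) = a ∧ k' < b.length then v else b.getD k' 0 := by
      intro k'
      rw [hb1, PySem.List.pySetD_of_nonneg b v ha0]
      simp only [List.getD_eq_getElem?_getD, List.getElem?_set]
      have hcast : (a.toNat : Int) = a := Int.toNat_of_nonneg ha0
      split_ifs
      all_goals try rfl
      all_goals try (exfalso; omega)
      rw [List.getElem?_eq_none (by omega)]
    have hbi : b1.getD i.toNat 0 = b.getD i.toNat 0 := by
      rw [hb1get]; rw [if_neg]; rintro ⟨h1, _⟩; omega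
    have hvv : v = b.getD a.toNat 0 - (a - i + 1) * b.getD i.toNat 0 := by
      rw [hv, pyGetD_nn b a ha0, pyGetD_nn b i hia]
    rw [hbi, hb1get k, hlen1]
    split_ifs
    all_goals try rfl
    all_goals try (exfalso; omega)
    have hak : a.toNat = k := by omega
    have hka' : a = (k : Int) := by omega
    rw [hvv, hak, hka']

theorem A_outer (n : Int) (L : List Int) (h1 : 1 ≤ n) (hlen : n ≤ (L.length : Int))
    (m : Nat) (hm : (m:Int) ≤ n - 1) :
    ((PySem.List.pyRange 0 (m:Int) 1).foldl
      (fun (st : Int × List Int) i =>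
        let napp := st.1 + |PySem.List.pyGetD st.2 i 0|
        let b := (PySem.List.pyRange (i + 1) n 1).foldl
          (fun b j =>
            PySem.List.pySetD b j
              (PySem.List.pyGetD b j 0 - (j - i + 1) * PySem.List.pyGetD b i 0)) st.2
        (napp, b))
      (0, L)).1 = ∑ i ∈ Finset.range m, |pvC L i| ∧
    ((PySem.List.pyRange 0 (m:Int) 1).foldl
      (fun (st : Int × List Int) i =>
        let napp := st.1 + |PySem.List.pyGetD st.2 i 0|
        let b := (PySem.List.pyRange (i + 1) n 1).foldl
          (fun b j =>
            PySem.List.pySetD b j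
              (PySem.List.pyGetD b j 0 - (j - i + 1) * PySem.List.pyGetD b i 0)) st.2
        (napp, b))
      (0, L)).2.length = L.length ∧
    ∀ k : Nat, k < L.length →
      ((PySem.List.pyRange 0 (m:Int) 1).foldl
        (fun (st : Int × List Int) i =>
          let napp := st.1 + |PySem.List.pyGetD st.2 i 0|
          let b := (PySem.List.pyRange (i + 1) n 1).foldl
            (fun b j =>
              PySem.List.pySetD b j
                (PySem.List.pyGetD b j 0 - (j - i + 1) * PySem.List.pyGetD b i 0)) st.2
          (napp, b))
        (0, L)).2.getD k 0
      = if (k:Int) < n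
        then L.getD k 0 - ∑ i ∈ Finset.range (min k m), ((k:Int) - (i:Int) + 1) * pvC L i
        else L.getD k 0 := by
  induction m with
  | zero =>
    refine ⟨by simp, by simp, fun k hk => ?_⟩
    simp only [Nat.cast_zero]
    split_ifs <;> simp
  | succ m ih =>
    have hm' : (m:Int) ≤ n - 1 := by push_cast at hm ⊢; omega
    obtain ⟨hacc, hlen2, hget⟩ := ih hm'
    have hc : ((m:Int) + 1) = ((m+1 : Nat) : Int) := by push_cast; ring
    rw [← hc, PySem.List.pyRange_one_succ_right (by positivity), List.foldl_append]
    simp only [List.foldl_cons, List.foldl_nil]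
    have hmlen : m < L.length := by omega
    have hmn : (m:Int) < n := by omega
    -- value read at position m is pvC L m
    have hread : PySem.List.pyGetD ((PySem.List.pyRange 0 (m:Int) 1).foldl
        (fun (st : Int × List Int) i =>
          let napp := st.1 + |PySem.List.pyGetD st.2 i 0|
          let b := (PySem.List.pyRange (i + 1) n 1).foldl
            (fun b j =>
              PySem.List.pySetD b j
                (PySem.List.pyGetD b j 0 - (j - i + 1) * PySem.List.pyGetD b i 0)) st.2
          (napp, b))
        (0, L)).2 (m:Int) 0 = pvC L m := by
      rw [pyGetD_nn _ _ (by positivity)]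
      simp only [Int.toNat_natCast]
      rw [hget m hmlen, if_pos hmn, Nat.min_self, ← pvC_eq]
    obtain ⟨ilen, iget⟩ := A_inner_aux (m:Int) n (by positivity) ((n - ((m:Int)+1)).toNat)
      ((m:Int)+1) ((PySem.List.pyRange 0 (m:Int) 1).foldl
        (fun (st : Int × List Int) i =>
          let napp := st.1 + |PySem.List.pyGetD st.2 i 0|
          let b := (PySem.List.pyRange (i + 1) n 1).foldl
            (fun b j =>
              PySem.List.pySetD b j
                (PySem.List.pyGetD b j 0 - (j - i + 1) * PySem.List.pyGetD b i 0)) st.2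
          (napp, b))
        (0, L)).2 (by omega) rfl
    refine ⟨?_, ?_, fun k hk => ?_⟩
    · simp only [hacc, hread, Finset.sum_range_succ]
    · rw [ilen, hlen2]
    · rw [iget k, hlen2]
      simp only [Int.toNat_natCast]
      rw [pyGetD_nn _ _ (by positivity)] at hread
      simp only [Int.toNat_natCast] at hread
      by_cases hkn : (k:Int) < n
      · rw [if_pos hkn]
        by_cases hk2 : (m:Int) + 1 ≤ (k:Int)
        · rw [if_pos ⟨hk2, hkn, hk⟩, hget k hk, if_pos hkn, hread]
          have hmin1 : min k m = m := by omega
          have hmin2 : min k (m+1) = m + 1 := by omega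
          rw [hmin1, hmin2, Finset.sum_range_succ]
          ring
        · rw [if_neg (by rintro ⟨h1, _, _⟩; omega), hget k hk, if_pos hkn]
          have : min k m = min k (m+1) := by omega
          rw [this]
      · rw [if_neg hkn, if_neg (by rintro ⟨_, h2, _⟩; omega), hget k hk, if_neg hkn]

theorem getD_last (xs : List Int) (h : xs ≠ []) :
    PySem.List.pyGetD xs (-1) 0 = xs.getD (xs.length - 1) 0 := by
  rw [PySem.List.pyGetD_neg_one xs 0 h]
  have hl : xs.length - 1 < xs.length := by
    cases xs with
    | nil => exact absurd rfl h
    | cons a l => simp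
  rw [List.getD_eq_getElem?_getD, List.getElem?_eq_getElem hl, List.getLast_eq_getElem]
  rfl

-- ===== VERDICT (by name: the statement is the Claim_ definition above) =====
theorem make_healthy_spec : Claim_equal_make_healthy := by
  intro n L _ hPre
  obtain ⟨hne, hlen⟩ := hPre
  unfold Spec_make_healthy
  have hlpos : 0 < L.length := List.length_pos_of_ne_nil hne
  by_cases hn : n ≤ 0
  · simp only [make_healthy, make_healthy_alt,
      PySem.List.pyRange_one_eq_nil (show n - 1 ≤ 0 by omega),
      PySem.List.pyRange_one_eq_nil (show n ≤ (0:Int) by omega), List.foldl_nil]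
  · have h1 : 1 ≤ n := by omega
    have hNn : ((n.toNat : Nat) : Int) = n := Int.toNat_of_nonneg (by omega)
    have hMn : (((n-1).toNat : Nat) : Int) = n - 1 := Int.toNat_of_nonneg (by omega)
    have hNM : n.toNat = (n-1).toNat + 1 := by omega
    obtain ⟨hacc, hlen2, hget⟩ := A_outer n L h1 hlen (n-1).toNat (by omega)
    have hklast : L.length - 1 < L.length := by omega
    -- A's value
    have hA : make_healthy n L
        = (∑ i ∈ Finset.range (n-1).toNat, |pvC L i|)
          + |if ((L.length - 1 : Nat) : Int) < n
             then L.getD (L.length - 1) 0 - ∑ i ∈ Finset.range (min (L.length - 1) (n-1).toNat), (((L.length - 1 : Nat) : Int) - (i:Int) + 1) * pvC L i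
             else L.getD (L.length - 1) 0| := by
      simp only [make_healthy]
      rw [show PySem.List.pyRange 0 (n-1) 1 = PySem.List.pyRange 0 (((n-1).toNat : Nat) : Int) 1 by rw [hMn]]
      have hne2 : ((PySem.List.pyRange 0 (((n-1).toNat : Nat) : Int) 1).foldl
        (fun (st : Int × List Int) i =>
          let napp := st.1 + |PySem.List.pyGetD st.2 i 0|
          let b := (PySem.List.pyRange (i + 1) n 1).foldl
            (fun b j =>
              PySem.List.pySetD b j
                (PySem.List.pyGetD b j 0 - (j - i + 1) * PySem.List.pyGetD b i 0)) st.2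
          (napp, b))
        (0, L)).2 ≠ [] := by
        intro hc
        have := hlen2
        rw [hc] at this
        simp at this
        omega
      rw [hacc, getD_last _ hne2, hlen2, hget (L.length - 1) hklast]
    -- B's value
    have hB : make_healthy_alt n L
        = (∑ i ∈ Finset.range n.toNat, (if (i:Int) < n - 1 then |pvC L i| else 0))
          + |if L.length - 1 < n.toNat ∧ L.length - 1 < L.length
             then pvC L (L.length - 1) else L.getD (L.length - 1) 0| := by
      simp only [make_healthy_alt]
      rw [show PySem.List.pyRange 0 n 1 = PySem.List.pyRange 0 ((n.toNat : Nat) : Int) 1 by rw [hNn]]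
      rw [B_loop n L n.toNat]
      have hne3 : pvFin L n.toNat ≠ [] := by
        intro hc
        have := pvFin_length L n.toNat
        rw [hc] at this; simp at this; omega
      rw [getD_last _ hne3, pvFin_length, pvFin_getD]
    -- the running total of B equals A's napplications sum
    have hsum : (∑ i ∈ Finset.range n.toNat, (if (i:Int) < n - 1 then |pvC L i| else 0))
        = ∑ i ∈ Finset.range (n-1).toNat, |pvC L i| := by
      rw [hNM, Finset.sum_range_succ, if_neg (by omega)]
      rw [add_zero]
      refine Finset.sum_congr rfl (fun i hi => ?_)
      rw [Finset.mem_range] at hi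
      rw [if_pos (by omega)]
    rw [hA, hB, hsum]
    by_cases hcase : L.length ≤ n.toNat
    · have hLn : L.length = n.toNat := by omega
      rw [if_pos (by omega), if_pos ⟨by omega, hklast⟩]
      have hmm : min (L.length - 1) (n-1).toNat = L.length - 1 := by omega
      rw [hmm, pvC_eq L (L.length - 1)]
    · rw [if_neg (by omega), if_neg (by rintro ⟨h1, _⟩; omega)]
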